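-- pv_equiv track=rewrite | github.com/skutam/master-thesis | AnalysisFramework/src/AnalyticalFramework/SequenceAnalysis.py | _is_neighbor
-- ===== SOURCE A (Python) =====
-- from typing import Tuple, Optional
--
-- def _get_index(_list: Tuple, word: str) -> Optional[Tuple[int, int]]:
--     """
--         Get index of character in list
--
--         Parameters
--         ----------
--         _list: Tuple
--             List of lists containing keyboard or numpad characters
--
--         Returns
--         -------
--         Optional[Tuple[int, int]]
--             Return Tuple of indexes, or None when not found
--     """
--     for (i, sub_list) in enumerate(_list):
--         if word in sub_list:
--             return sub_list.index(word), i
--     return None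
--
-- def _is_neighbor(char_a: str, char_b: str, _list: Tuple) -> bool:
--     """
--         Check if char_b is neighbor of char_a
--
--         Parameters
--         ----------
--         char_a: str
--             Character one
--         char_b: str
--             Second character that may be neighbour of char_a
--         _list: Tuple
--             List representing keyboard
--
--         Returns
--         -------
--         bool
--             True when char_a is neighbor of char_b, False otherwise
--     """
--     # Get char_a index in list
--     index = _get_index(_list, char_a)
--
--     # Index not found, char_a has no neighbor
--     if index is None:
--         return False
--
--     # Check all possible characters around char_a
--     for x in range(-1, 2):
--         for y in range(-1, 2):
--             i = index[1] - x
--             j = index[0] - y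
--
--             # When index is in range, check if char_b, is neighbor of char_a
--             if 0 <= i < len(_list) and 0 <= j < len(_list[i]):
--
--                 # char_b is neighbour
--                 if _list[i][j] == char_b:
--                     return True
--
--     # char_b is not neighbour of char_a
--     return False
-- ===== SOURCE B (Python) =====
-- def _is_neighbor(char_a: str, char_b: str, _list) -> bool:
--     # Flatten the keyboard into (char, row, col) cells once, then compare coordinates.
--     cells = [(ch, r, c) for r, row in enumerate(_list) for c, ch in enumerate(row)]
--     pos_a = next(((r, c) for ch, r, c in cells if ch == char_a), None)
--     if pos_a is None:
--         return False
--     ra, ca = pos_a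
--     return any(ch == char_b and abs(r - ra) <= 1 and abs(c - ca) <= 1
--                for ch, r, c in cells)
-- ===== Notes on version B (the rewrite author's own statement) =====
-- stated objective: alternative
-- what changed: B flattens the keyboard into one (char,row,col) cell list, takes char_a's first cell, and tests whether any cell holding char_b is within Chebyshev distance 1, replacing A's 3x3 offset-cell scan with bounds checks and repeated indexing.
import Mathlib
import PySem

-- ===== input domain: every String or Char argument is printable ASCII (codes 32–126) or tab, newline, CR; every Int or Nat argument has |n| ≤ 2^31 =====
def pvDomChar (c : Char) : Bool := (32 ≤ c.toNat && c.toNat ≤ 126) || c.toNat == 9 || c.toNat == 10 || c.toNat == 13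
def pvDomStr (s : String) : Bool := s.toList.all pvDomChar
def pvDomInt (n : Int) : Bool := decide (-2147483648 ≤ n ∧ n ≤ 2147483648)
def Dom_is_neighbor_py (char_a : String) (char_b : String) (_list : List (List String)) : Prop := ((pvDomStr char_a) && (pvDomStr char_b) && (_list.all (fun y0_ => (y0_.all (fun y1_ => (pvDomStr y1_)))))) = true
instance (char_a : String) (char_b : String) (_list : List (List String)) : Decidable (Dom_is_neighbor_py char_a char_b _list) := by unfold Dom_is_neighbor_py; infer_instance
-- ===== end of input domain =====

-- B replaces A's 3×3 offset-cell scan by one flattened (char,row,col) cell list and a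
-- Chebyshev-distance-≤1 coordinate test (objective: alternative/idiomatic).

-- ===== PORT A =====
-- _get_index: first row containing word, column = sub_list.index(word); returns (col, row)
def pvGetIndex (word : String) : List (List String) → Int → Option (Int × Int)
  | [], _ => none
  | row :: rest, i =>
    match PySem.List.index? row word with    -- 'word in sub_list' + 'sub_list.index(word)'
    | some j => some ((j : Int), i)
    | none => pvGetIndex word rest (i + 1)

def is_neighbor_py (char_a : String) (char_b : String) (_list : List (List String)) : Bool :=
  match pvGetIndex char_a _list 0 with
  | none => false
  | some (jx, iy) =>
    -- for x in range(-1, 2): for y in range(-1, 2): (early return True = any)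
    ([-1, 0, 1] : List Int).any fun x =>
      ([-1, 0, 1] : List Int).any fun y =>
        let i := iy - x
        let j := jx - y
        if 0 ≤ i ∧ i < (_list.length : Int) then
          let row := _list.getD i.toNat []
          if 0 ≤ j ∧ j < (row.length : Int) then
            row.getD j.toNat "" == char_b
          else false
        else false

-- ===== PORT B =====
-- cells = [(ch, r, c) for r, row in enumerate(_list) for c, ch in enumerate(row)]
def pvCells (_list : List (List String)) : List (String × Int × Int) :=
  (PySem.List.enumerate _list 0).flatMap fun p =>
    (PySem.List.enumerate p.2 0).map fun q => (q.2, p.1, q.1)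

def is_neighbor_py_alt (char_a : String) (char_b : String) (_list : List (List String)) : Bool :=
  match (pvCells _list).find? (fun t => t.1 == char_a) with
  | none => false
  | some (_, ra, ca) =>
    (pvCells _list).any fun t =>
      t.1 == char_b && decide ((t.2.1 - ra).natAbs ≤ 1) && decide ((t.2.2 - ca).natAbs ≤ 1)

-- ===== PRECONDITION & SPEC =====
def Spec_is_neighbor_py (char_a : String) (char_b : String) (_list : List (List String)) (out : Bool) : Prop := out = is_neighbor_py_alt char_a char_b _list
instance (char_a : String) (char_b : String) (_list : List (List String)) (out : Bool) : Decidable (Spec_is_neighbor_py char_a char_b _list out) := by unfold Spec_is_neighbor_py; infer_instance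

-- ===== CLAIM (what is proved, stated in full; the proofs are below) =====
def Claim_equal_is_neighbor_py : Prop := ∀ (char_a : String) (char_b : String) (_list : List (List String)), Dom_is_neighbor_py char_a char_b _list → Spec_is_neighbor_py char_a char_b _list (is_neighbor_py char_a char_b _list)

-- ===== LEMMAS AND PROOFS =====

-- find? on one mapped enumerated row agrees with index?
lemma find_row (a : String) (r : Int) : ∀ (row : List String) (c : Nat),
    (((PySem.List.enumerate row (c : Int)).map (fun q => (q.2, r, q.1))).find?
        (fun t => t.1 == a))
      = (PySem.List.index? row a).map (fun j => (a, r, ((c + j : Nat) : Int))) := by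
  intro row
  induction row with
  | nil => intro c; simp [PySem.List.enumerate_nil, PySem.List.index?]
  | cons x xs ih =>
    intro c
    by_cases hx : x = a
    · subst hx
      rw [PySem.List.index?_cons_self]
      simp [PySem.List.enumerate_cons]
    · rw [PySem.List.index?_cons_of_ne xs hx]
      simp only [PySem.List.enumerate_cons, List.map_cons]
      rw [List.find?_cons_of_neg (by simp [hx])]
      have h := ih (c + 1)
      push_cast at h ⊢
      rw [h]
      cases PySem.List.index? xs a with
      | none => simp
      | some j => simp; ring

-- find? on the flattened cell list agrees with _get_index
lemma find_cells (a : String) : ∀ (L : List (List String)) (s : Nat),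
    (((PySem.List.enumerate L (s : Int)).flatMap fun p =>
        (PySem.List.enumerate p.2 0).map fun q => (q.2, p.1, q.1)).find?
        (fun t => t.1 == a))
      = (pvGetIndex a L s).map (fun p => (a, p.2, p.1)) := by
  intro L
  induction L with
  | nil => intro s; simp [PySem.List.enumerate_nil, pvGetIndex]
  | cons row rest ih =>
    intro s
    simp only [PySem.List.enumerate_cons, List.flatMap_cons, List.find?_append, pvGetIndex]
    have hrow := find_row a (s : Int) row 0
    simp only [Nat.cast_zero] at hrow
    rw [hrow]
    cases h : PySem.List.index? row a with
    | some j => simp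
    | none =>
      simp only [Option.map_none, Option.none_or]
      have h2 := ih (s + 1)
      push_cast at h2 ⊢
      exact h2

-- membership in the flattened cell list
lemma mem_pvCells (t : String × Int × Int) (L : List (List String)) :
    t ∈ pvCells L ↔ ∃ (r : Nat) (hr : r < L.length) (c : Nat) (hc : c < L[r].length),
      t = (L[r][c], (r : Int), (c : Int)) := by
  unfold pvCells
  simp only [List.mem_flatMap, List.mem_map, PySem.List.mem_enumerate_iff]
  constructor
  · rintro ⟨p, ⟨r, hr, rfl⟩, q, ⟨c, hc, rfl⟩, rfl⟩
    exact ⟨r, hr, c, hc, by simp⟩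
  · rintro ⟨r, hr, c, hc, rfl⟩
    exact ⟨((r : Int), L[r]), ⟨r, hr, by simp⟩, ((c : Int), L[r][c]), ⟨c, hc, by simp⟩, rfl⟩

-- getIndex returns nonnegative coordinates (all we need about the found position)
lemma pvGetIndex_some (a : String) : ∀ (L : List (List String)) (s : Nat) (jx iy : Int),
    pvGetIndex a L s = some (jx, iy) → 0 ≤ jx ∧ (s : Int) ≤ iy := by
  intro L
  induction L with
  | nil => intro s jx iy h; simp [pvGetIndex] at h
  | cons row rest ih =>
    intro s jx iy h
    unfold pvGetIndex at h
    cases hidx : PySem.List.index? row a with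
    | some j =>
      rw [hidx] at h
      simp only [Option.some.injEq, Prod.mk.injEq] at h
      obtain ⟨hjx, hiy⟩ := h
      constructor <;> omega
    | none =>
      rw [hidx] at h
      have h' : pvGetIndex a rest (((s + 1 : Nat)) : Int) = some (jx, iy) := by
        push_cast; exact h
      have := ih (s + 1) jx iy h'
      push_cast at this
      exact ⟨this.1, by omega⟩

-- ===== VERDICT (by name: the statement is the Claim_ definition above) =====
theorem is_neighbor_py_spec : Claim_equal_is_neighbor_py := by
  intro a b L _
  unfold Spec_is_neighbor_py is_neighbor_py is_neighbor_py_alt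
  have hfind : (pvCells L).find? (fun t => t.1 == a)
      = (pvGetIndex a L 0).map (fun p => (a, p.2, p.1)) := by
    have h := find_cells a L 0
    simp only [Nat.cast_zero] at h
    simpa [pvCells] using h
  rw [hfind]
  cases hgi : pvGetIndex a L 0 with
  | none => simp
  | some p =>
    obtain ⟨jx, iy⟩ := p
    obtain ⟨hjx0, hiy0⟩ := pvGetIndex_some a L 0 jx iy hgi
    simp only [Option.map_some]
    rw [Bool.eq_iff_iff]
    simp only [List.any_eq_true]
    constructor
    · rintro ⟨x, hx, y, hy, hinner⟩
      simp only [List.mem_cons, List.not_mem_nil, or_false] at hx hy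
      split_ifs at hinner with h1 h2
      · obtain ⟨h1a, h1b⟩ := h1
        obtain ⟨h2a, h2b⟩ := h2
        have hilen : (iy - x).toNat < L.length := by omega
        have hrow : L.getD (iy - x).toNat [] = L[(iy - x).toNat] := List.getD_eq_getElem L [] hilen
        rw [hrow] at h2b hinner
        have hjlen : (jx - y).toNat < L[(iy - x).toNat].length := by omega
        have hcell : (L[(iy - x).toNat]).getD (jx - y).toNat "" = L[(iy - x).toNat][(jx - y).toNat] :=
          List.getD_eq_getElem _ "" hjlen
        rw [hcell] at hinner
        refine ⟨(L[(iy - x).toNat][(jx - y).toNat], ((iy - x).toNat : Int), ((jx - y).toNat : Int)),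
          (mem_pvCells _ L).2 ⟨(iy - x).toNat, hilen, (jx - y).toNat, hjlen, rfl⟩, ?_⟩
        simp only [Bool.and_eq_true, beq_iff_eq, decide_eq_true_eq] at hinner ⊢
        refine ⟨⟨hinner, ?_⟩, ?_⟩ <;> omega
    · rintro ⟨t, htmem, htp⟩
      obtain ⟨r, hr, c, hc, rfl⟩ := (mem_pvCells t L).1 htmem
      simp only [Bool.and_eq_true, beq_iff_eq, decide_eq_true_eq] at htp
      obtain ⟨⟨hcell, hdr⟩, hdc⟩ := htp
      refine ⟨iy - r, ?_, jx - c, ?_, ?_⟩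
      · simp only [List.mem_cons, List.not_mem_nil, or_false]
        omega
      · simp only [List.mem_cons, List.not_mem_nil, or_false]
        omega
      · have e1 : iy - (iy - (r : Int)) = (r : Int) := by ring
        have e2 : jx - (jx - (c : Int)) = (c : Int) := by ring
        rw [e1, e2]
        have hb1 : (0 : Int) ≤ (r : Int) ∧ (r : Int) < (L.length : Int) := by
          constructor <;> [positivity; exact_mod_cast hr]
        rw [if_pos hb1]
        have hrow : L.getD ((r : Int)).toNat [] = L[r] := by
          simp only [Int.toNat_natCast]; exact List.getD_eq_getElem L [] hr
        rw [hrow]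
        have hb2 : (0 : Int) ≤ (c : Int) ∧ (c : Int) < (L[r].length : Int) := by
          constructor <;> [positivity; exact_mod_cast hc]
        rw [if_pos hb2]
        have hcol : (L[r]).getD ((c : Int)).toNat "" = L[r][c] := by
          simp only [Int.toNat_natCast]; exact List.getD_eq_getElem (L[r]) "" hc
        rw [hcol]
        exact beq_iff_eq.mpr hcell
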